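-- pv_equiv track=rewrite | github.com/krshbalaji/Quant_Ecosystem-3.0 | quant_ecosystem/reporting/analytics/institutional_report_engine.py | _exposure_heatmap
-- ===== SOURCE A (Python) =====
-- def _exposure_heatmap(trades):
--     heat = {}
--     for trade in trades:
--         regime = str(trade.get("regime", "UNKNOWN"))
--         asset = str(trade.get("asset_class", "UNKNOWN"))
--         heat.setdefault(regime, {})
--         heat[regime][asset] = heat[regime].get(asset, 0) + abs(int(trade.get("qty", 0)))
--     return heat
-- ===== SOURCE B (Python) =====
-- def _exposure_heatmap(trades):
--     # Group-by without mutating dict accumulation: extract one (regime, asset, |qty|) row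
--     # per trade, then build the nested result declaratively from first-occurrence-ordered
--     # deduplicated key lists and filtered sums.
--     rows = [(str(t.get("regime", "UNKNOWN")), str(t.get("asset_class", "UNKNOWN")),
--              abs(int(t.get("qty", 0)))) for t in trades]
--     return {
--         r: {
--             a: sum(q for (r2, a2, q) in rows if r2 == r and a2 == a)
--             for a in dict.fromkeys(a2 for (r2, a2, _) in rows if r2 == r)
--         }
--         for r in dict.fromkeys(r for (r, _, _) in rows)
--     }
-- ===== Notes on version B (the rewrite author's own statement) =====
-- stated objective: alternative
-- what changed: B replaces A's single pass of in-place nested-dict mutation (setdefault + running get/add) by a declarative group-by: one comprehension extracting (regime, asset, |qty|) rows, then the nested dict is built from first-occurrence deduplicated regime/asset key lists with each cell a filtered sum over the rows.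
import Mathlib
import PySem

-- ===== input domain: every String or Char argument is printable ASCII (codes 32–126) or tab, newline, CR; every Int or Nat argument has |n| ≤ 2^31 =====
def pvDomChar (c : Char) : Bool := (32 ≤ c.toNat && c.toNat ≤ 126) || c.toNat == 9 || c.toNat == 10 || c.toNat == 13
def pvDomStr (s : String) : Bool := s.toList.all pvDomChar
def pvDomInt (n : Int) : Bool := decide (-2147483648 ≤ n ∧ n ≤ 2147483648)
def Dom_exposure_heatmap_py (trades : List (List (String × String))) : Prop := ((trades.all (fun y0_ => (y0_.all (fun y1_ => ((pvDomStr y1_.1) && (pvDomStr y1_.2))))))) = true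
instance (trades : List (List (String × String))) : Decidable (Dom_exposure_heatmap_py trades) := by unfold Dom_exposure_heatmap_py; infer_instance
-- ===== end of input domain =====

-- B replaces A's single pass of in-place nested-dict mutation by a declarative group-by:
-- a row list (regime, asset, |qty|), then nested output built from ordered-dedup key lists
-- with filtered sums (objective: alternative; same return value).

-- ===== PORT A =====
-- A: one pass, nested dict built directly: heat.setdefault(regime, {}); heat[regime][asset] = get + abs(int(qty)).
def exposure_heatmap_py (trades : List (List (String × String))) : List (String × List (String × Int)) :=
  let heat : PySem.Dict String (PySem.Dict String Int) :=
    trades.foldl (fun heat trade =>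
      let td : PySem.Dict String String := PySem.Dict.mk trade
      let regime := td.getD "regime" "UNKNOWN"
      let asset := td.getD "asset_class" "UNKNOWN"
      -- abs(int(trade.get("qty", 0))): absent key → int(0) = 0; present → int(s) (ValueError = none, excluded by Pre_)
      let qty : Int := |(((td.get? "qty").elim (some 0) PySem.Int.ofStr?).getD 0)|
      let heat := heat.setdefault regime PySem.Dict.empty
      heat.modify regime PySem.Dict.empty (fun inner => inner.insert asset (inner.getD asset 0 + qty)))
      PySem.Dict.empty
  heat.items.map (fun p => (p.1, p.2.items))

-- ===== PORT B =====
-- B: rows = [(regime, asset, |qty|)] per trade; result = {r: {a: sum of matching rows}} over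
-- dict.fromkeys (ordered dedup, = PySem.List.dedup) of the regime / per-regime asset lists.
def exposure_heatmap_py_alt (trades : List (List (String × String))) : List (String × List (String × Int)) :=
  let rows : List (String × String × Int) := trades.map (fun t =>
    let td : PySem.Dict String String := PySem.Dict.mk t
    (td.getD "regime" "UNKNOWN", td.getD "asset_class" "UNKNOWN",
     |(((td.get? "qty").elim (some 0) PySem.Int.ofStr?).getD 0)|))
  (PySem.List.dedup (rows.map (fun p => p.1))).map (fun r =>
    (r, (PySem.List.dedup ((rows.filter (fun p => p.1 == r)).map (fun p => p.2.1))).map (fun a =>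
      (a, ((rows.filter (fun p => p.1 == r && p.2.1 == a)).map (fun p => p.2.2)).sum))))

-- ===== PRECONDITION & SPEC =====
-- Pre_ excludes exactly the inputs on which A raises ValueError: a trade whose "qty" value does not parse as int.
def Pre_exposure_heatmap_py (trades : List (List (String × String))) : Prop :=
  (trades.all (fun t => ((PySem.Dict.mk t).get? "qty").elim true (fun s => (PySem.Int.ofStr? s).isSome))) = true
instance (trades : List (List (String × String))) : Decidable (Pre_exposure_heatmap_py trades) := by unfold Pre_exposure_heatmap_py; infer_instance

def pvWitness_exposure_heatmap_py : (List (List (String × String))) :=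
  [[("regime", "BULL"), ("asset_class", "EQ"), ("qty", "-7")], [("regime", "BULL"), ("qty", " 3 ")]]

def Spec_exposure_heatmap_py (trades : List (List (String × String))) (out : List (String × List (String × Int))) : Prop := out = exposure_heatmap_py_alt trades
instance (trades : List (List (String × String))) (out : List (String × List (String × Int))) : Decidable (Spec_exposure_heatmap_py trades out) := by unfold Spec_exposure_heatmap_py; infer_instance

-- ===== CLAIM (what is proved, stated in full; the proofs are below) =====
def Claim_equal_exposure_heatmap_py : Prop := ∀ (trades : List (List (String × String))), Dom_exposure_heatmap_py trades → Pre_exposure_heatmap_py trades → Spec_exposure_heatmap_py trades (exposure_heatmap_py trades)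

-- ===== LEMMAS AND PROOFS =====

-- per-trade row ((regime, asset), |qty|), the value both ports extract from a trade
def hmRow (t : List (String × String)) : (String × String) × Int :=
  let td : PySem.Dict String String := PySem.Dict.mk t
  ((td.getD "regime" "UNKNOWN", td.getD "asset_class" "UNKNOWN"),
   |(((td.get? "qty").elim (some 0) PySem.Int.ofStr?).getD 0)|)

lemma get?_map_graph {κ ν : Type} [BEq κ] [LawfulBEq κ] (s : List κ) (f : κ → ν) (r : κ) :
    (PySem.Dict.mk (s.map (fun x => (x, f x)))).get? r = if r ∈ s then some (f r) else none := by
  induction s with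
  | nil => simp [PySem.Dict.get?]
  | cons a s ih =>
    rw [List.map_cons, PySem.Dict.get?_mk_cons]
    by_cases h : a = r
    · subst h; simp
    · have hb : (a == r) = false := by simp [h]
      simp [hb, ih, List.mem_cons, Ne.symm h]
lemma find?_beq_self {κ : Type} [BEq κ] [LawfulBEq κ] (s : List κ) (r : κ) :
    s.find? (· == r) = if r ∈ s then some r else none := by
  induction s with
  | nil => simp
  | cons a s ih =>
    by_cases h : a = r
    · subst h; simp
    · have hb : (a == r) = false := by simp [h]
      simp [List.find?_cons, hb, ih, List.mem_cons, Ne.symm h]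
lemma contains_map_graph (s : List String) (f : String → PySem.Dict String Int) (r : String) :
    (PySem.Dict.mk (s.map (fun x => (x, f x)))).contains r = decide (r ∈ s) := by
  rw [PySem.Dict.contains_eq_isSome_get?, get?_map_graph]
  by_cases h : r ∈ s <;> simp [h]
lemma setdefault_getD_graph (s : List String) (f : String → PySem.Dict String Int) (r : String) (dflt : PySem.Dict String Int) :
    ((PySem.Dict.mk (s.map (fun x => (x, f x)))).setdefault r dflt).getD r dflt
      = if r ∈ s then f r else dflt := by
  by_cases h : r ∈ s
  · rw [PySem.Dict.setdefault_of_contains _ _ (by rw [contains_map_graph]; simp [h])]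
    simp [PySem.Dict.getD, get?_map_graph, h]
  · have hfind : (List.find? (fun p => p.1 == r) (s.map (fun x => (x, f x)))) = none := by
      have := get?_map_graph s f r
      simp only [PySem.Dict.get?, h, if_false] at this
      exact Option.map_eq_none_iff.mp this
    rw [PySem.Dict.setdefault_of_not_contains _ _ (by rw [contains_map_graph]; simp [h])]
    simp [PySem.Dict.getD, PySem.Dict.get?, PySem.Dict.insert, contains_map_graph, h,
      List.find?_append, hfind]
lemma setdefault_insert_graph (s : List String) (f : String → PySem.Dict String Int) (r : String)
    (dflt W : PySem.Dict String Int) :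
    ((PySem.Dict.mk (s.map (fun x => (x, f x)))).setdefault r dflt).insert r W
      = PySem.Dict.mk ((PySem.Set.add s r).map (fun x => (x, if x = r then W else f x))) := by
  by_cases h : r ∈ s
  · rw [PySem.Dict.setdefault_of_contains _ _ (by rw [contains_map_graph]; simp [h])]
    apply PySem.Dict.ext
    rw [PySem.Dict.items_insert_of_contains _ _ (by rw [contains_map_graph]; simp [h])]
    rw [PySem.Set.add_of_mem h]
    simp only [List.map_map]
    apply List.map_congr_left
    intro x _
    by_cases hx : x = r
    · subst hx; simp
    · simp [hx, show (x == r) = false by simp [hx]]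
  · rw [PySem.Dict.setdefault_of_not_contains _ _ (by rw [contains_map_graph]; simp [h])]
    apply PySem.Dict.ext
    have hc2 : (PySem.Dict.mk (s.map (fun x => (x, f x)) ++ [(r, dflt)])).contains r = true := by
      simp [PySem.Dict.contains]
    have hstep : ((PySem.Dict.mk (s.map (fun x => (x, f x)))).insert r dflt) =
        PySem.Dict.mk (s.map (fun x => (x, f x)) ++ [(r, dflt)]) := by
      apply PySem.Dict.ext
      rw [PySem.Dict.items_insert_of_not_contains _ _ (by rw [contains_map_graph]; simp [h])]
    rw [hstep, PySem.Dict.items_insert_of_contains _ _ hc2]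
    rw [PySem.Set.add_of_not_mem h]
    simp only [List.map_append, List.map_map, List.map_cons, List.map_nil]
    congr 1
    · apply List.map_congr_left
      intro x hx
      have hxr : x ≠ r := fun hh => h (hh ▸ hx)
      simp [hxr, show (x == r) = false by simp [hxr]]
    · simp
def sumQ (P : List ((String × String) × Int)) (k : String × String) : Int :=
  ((P.filter (fun p => p.1 == k)).map (·.2)).sum
def innerG (L : List ((String × String) × Int)) (r : String) : PySem.Dict String Int :=
  PySem.Dict.mk ((L.filter (fun p => p.1.1 == r)).map (fun p => (p.1.2, p.2)))
def G (L : List ((String × String) × Int)) : PySem.Dict String (PySem.Dict String Int) :=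
  PySem.Dict.mk ((PySem.Set.ofList (L.map (·.1.1))).map (fun r => (r, innerG L r)))
def nstep (h : PySem.Dict String (PySem.Dict String Int)) (p : (String × String) × Int) : PySem.Dict String (PySem.Dict String Int) :=
  (h.setdefault p.1.1 PySem.Dict.empty).modify p.1.1 PySem.Dict.empty
    (fun inner => inner.insert p.1.2 (inner.getD p.1.2 0 + p.2))
def nestD (P : List ((String × String) × Int)) : PySem.Dict String (PySem.Dict String Int) :=
  P.foldl nstep PySem.Dict.empty
def MQ (P : List ((String × String) × Int)) : List ((String × String) × Int) :=
  (PySem.Set.ofList (P.map (·.1))).map (fun k => (k, sumQ P k))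

lemma sumQ_append (P : List ((String × String) × Int)) (p : (String × String) × Int) (k : String × String) :
    sumQ (P ++ [p]) k = sumQ P k + (if p.1 = k then p.2 else 0) := by
  by_cases h : p.1 = k
  · simp [sumQ, List.filter_append, List.filter_cons, h]
  · simp [sumQ, List.filter_append, List.filter_cons, h, show (p.1 == k) = false by simp [h]]

lemma sumQ_zero (P : List ((String × String) × Int)) (k : String × String) (h : k ∉ P.map (·.1)) :
    sumQ P k = 0 := by
  have : P.filter (fun p => p.1 == k) = [] := by
    rw [List.filter_eq_nil_iff]
    intro p hp
    simp only [beq_iff_eq]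
    exact fun hh => h (hh ▸ List.mem_map_of_mem hp)
  simp [sumQ, this]

lemma inner_get2 (s : List (String × String)) (g : String × String → Int) (r a : String) :
    (PySem.Dict.mk ((s.filter (fun k => k.1 == r)).map (fun k => (k.2, g k)))).get? a
      = ((s.find? (fun k => k == (r, a))).map g) := by
  induction s with
  | nil => simp [PySem.Dict.get?]
  | cons p s ih =>
    rw [List.filter_cons, List.find?_cons]
    by_cases h1 : p.1 = r
    · by_cases h2 : p.2 = a
      · have hp : p = (r, a) := by rw [← h1, ← h2]
        simp [h1, h2, hp, PySem.Dict.get?_mk_cons]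
      · have hne : (p == (r, a)) = false := by
          simp only [beq_eq_false_iff_ne, ne_eq]; intro hh; exact h2 (by rw [hh])
        have hb2 : (p.2 == a) = false := by simp [h2]
        simp [h1, hne, PySem.Dict.get?_mk_cons, hb2, ih]
    · have hne : (p == (r, a)) = false := by
        simp only [beq_eq_false_iff_ne, ne_eq]; intro hh; exact h1 (by rw [hh])
      have hb1 : (p.1 == r) = false := by simp [h1]
      simp [hb1, hne, ih]

lemma innerG_MQ (P : List ((String × String) × Int)) (x : String) :
    innerG (MQ P) x = PySem.Dict.mk (((PySem.Set.ofList (P.map (·.1))).filter (fun k => k.1 == x)).map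
      (fun k => (k.2, sumQ P k))) := by
  simp only [innerG, MQ, List.filter_map, List.map_map]
  rfl

lemma nstep_G (P : List ((String × String) × Int)) (p : (String × String) × Int) :
    nstep (G (MQ P)) p = G (MQ (P ++ [p])) := by
  obtain ⟨⟨r, a⟩, q⟩ := p
  have hregsMQ : ∀ Q : List ((String × String) × Int), (MQ Q).map (·.1.1)
      = (PySem.Set.ofList (Q.map (·.1))).map (·.1) := by
    intro Q; simp [MQ, List.map_map, Function.comp]
  have lhs : nstep (G (MQ P)) ((r, a), q)
      = PySem.Dict.mk ((PySem.Set.add (PySem.Set.ofList ((MQ P).map (·.1.1))) r).map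
          (fun x => (x, if x = r then
            (let In := (if r ∈ PySem.Set.ofList ((MQ P).map (·.1.1)) then innerG (MQ P) r else PySem.Dict.empty);
             In.insert a (In.getD a 0 + q))
            else innerG (MQ P) x))) := by
    simp only [nstep, G, PySem.Dict.modify]
    rw [setdefault_getD_graph, setdefault_insert_graph]
  rw [lhs]
  have hs' : PySem.Set.ofList ((P ++ [((r, a), q)]).map (·.1))
      = PySem.Set.add (PySem.Set.ofList (P.map (·.1))) (r, a) := by
    simp [PySem.Set.ofList_append_singleton]
  have hrin : r ∈ PySem.Set.ofList ((MQ P).map (·.1.1)) ↔ (r ∈ (PySem.Set.ofList (P.map (·.1))).map (·.1)) := by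
    rw [hregsMQ]; exact PySem.Set.mem_ofList _ r
  have hregs' : PySem.Set.ofList ((MQ (P ++ [((r, a), q)])).map (·.1.1))
      = PySem.Set.add (PySem.Set.ofList ((MQ P).map (·.1.1))) r := by
    rw [hregsMQ, hregsMQ, hs']
    by_cases hm : ((r, a) : String × String) ∈ PySem.Set.ofList (P.map (·.1))
    · rw [PySem.Set.add_of_mem hm, PySem.Set.add_of_mem]
      rw [PySem.Set.mem_ofList]
      exact List.mem_map_of_mem (f := (·.1)) hm
    · rw [PySem.Set.add_of_not_mem hm, List.map_append, List.map_cons, List.map_nil,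
          PySem.Set.ofList_append_singleton]
  simp only [G, hregs']
  congr 1
  apply List.map_congr_left
  intro x hx
  by_cases hxr : x = r
  · subst hxr
    simp only [if_pos rfl]
    have key : (let In := (if x ∈ PySem.Set.ofList ((MQ P).map (·.1.1)) then innerG (MQ P) x else PySem.Dict.empty);
        In.insert a (In.getD a 0 + q)) = innerG (MQ (P ++ [((x, a), q)])) x := by
      by_cases hr : x ∈ PySem.Set.ofList ((MQ P).map (·.1.1))
      · simp only [if_pos hr]
        have hget : (innerG (MQ P) x).get? a
            = if ((x, a) : String × String) ∈ PySem.Set.ofList (P.map (·.1)) then some (sumQ P (x, a)) else none := by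
          rw [innerG_MQ, inner_get2, find?_beq_self]
          by_cases hka : ((x, a) : String × String) ∈ PySem.Set.ofList (P.map (·.1)) <;> simp [hka]
        by_cases hka : ((x, a) : String × String) ∈ PySem.Set.ofList (P.map (·.1))
        · have hgetD : (innerG (MQ P) x).getD a 0 = sumQ P (x, a) := by
            rw [PySem.Dict.getD, hget, if_pos hka]; rfl
          have hcont : (innerG (MQ P) x).contains a = true := by
            rw [PySem.Dict.contains_eq_isSome_get?, hget, if_pos hka]; rfl
          apply PySem.Dict.ext
          rw [PySem.Dict.items_insert_of_contains _ _ hcont, hgetD]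
          rw [innerG_MQ, innerG_MQ, hs', PySem.Set.add_of_mem hka]
          simp only [PySem.Dict.items, List.map_map]
          apply List.map_congr_left
          intro k hk
          rcases List.mem_filter.mp hk with ⟨hks, hkx⟩
          have hk1 : k.1 = x := by simpa using hkx
          by_cases hk2 : k.2 = a
          · have hkeq : k = (x, a) := by rw [← hk1, ← hk2]
            simp only [Function.comp_apply, hk2, beq_self_eq_true, if_true]
            rw [hkeq, sumQ_append]
            simp
          · simp only [Function.comp_apply, show (k.2 == a) = false by simp [hk2], if_false]
            rw [sumQ_append]
            have : ((x, a) : String × String) ≠ k := by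
              intro hh; exact hk2 (by rw [← hh])
            simp [this]
        · have hgetD : (innerG (MQ P) x).getD a 0 = 0 := by
            rw [PySem.Dict.getD, hget, if_neg hka]; rfl
          have hcont : (innerG (MQ P) x).contains a = false := by
            rw [PySem.Dict.contains_eq_isSome_get?, hget, if_neg hka]; rfl
          have hPka : ((x, a) : String × String) ∉ P.map (·.1) := by
            rw [← PySem.Set.mem_ofList (P.map (·.1)) (x, a)]; exact hka
          apply PySem.Dict.ext
          rw [PySem.Dict.items_insert_of_not_contains _ _ hcont, hgetD]
          rw [innerG_MQ, innerG_MQ, hs', PySem.Set.add_of_not_mem hka]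
          rw [List.filter_append, List.filter_cons]
          simp only [beq_self_eq_true, if_true, List.filter_nil, List.map_append, PySem.Dict.items]
          congr 1
          · apply List.map_congr_left
            intro k hk
            rcases List.mem_filter.mp hk with ⟨hks, hkx⟩
            have : ((x, a) : String × String) ≠ k := by
              intro hh; exact hka (hh ▸ hks)
            rw [sumQ_append]; simp [this]
          · simp [sumQ_append, sumQ_zero P (x, a) hPka]
      · simp only [if_neg hr]
        have hxs : x ∉ (PySem.Set.ofList (P.map (·.1))).map (·.1) := by
          rw [← hregsMQ]; exact fun hh => hr ((PySem.Set.mem_ofList _ x).mpr (by rw [hregsMQ] at hh ⊢; exact hh))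
        have hka : ((x, a) : String × String) ∉ PySem.Set.ofList (P.map (·.1)) := by
          intro hh; exact hxs (List.mem_map_of_mem (f := (·.1)) hh)
        have hPka : ((x, a) : String × String) ∉ P.map (·.1) := by
          rw [← PySem.Set.mem_ofList (P.map (·.1)) (x, a)]; exact hka
        have hnilf : (PySem.Set.ofList (P.map (·.1))).filter (fun k => k.1 == x) = [] := by
          rw [List.filter_eq_nil_iff]
          intro k hk
          simp only [beq_iff_eq]
          exact fun hh => hxs (hh ▸ List.mem_map_of_mem (f := (·.1)) hk)
        apply PySem.Dict.ext
        rw [PySem.Dict.items_insert_of_not_contains _ _ (by rfl)]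
        rw [innerG_MQ, hs', PySem.Set.add_of_not_mem hka]
        rw [List.filter_append, List.filter_cons, hnilf]
        simp only [beq_self_eq_true, if_true, List.filter_nil, List.map_append, PySem.Dict.items]
        simp [sumQ_append, sumQ_zero P (x, a) hPka, PySem.Dict.empty, PySem.Dict.getD, PySem.Dict.get?]
    rw [key]
    simp
  · rw [if_neg hxr]
    have hfilter : (PySem.Set.ofList ((P ++ [((r, a), q)]).map (·.1))).filter (fun k => k.1 == x)
        = (PySem.Set.ofList (P.map (·.1))).filter (fun k => k.1 == x) := by
      rw [hs']
      by_cases hm : ((r, a) : String × String) ∈ PySem.Set.ofList (P.map (·.1))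
      · rw [PySem.Set.add_of_mem hm]
      · rw [PySem.Set.add_of_not_mem hm, List.filter_append, List.filter_cons]
        simp [show ¬ (r = x) from fun hh => hxr (hh.symm)]
    congr 1
    rw [innerG_MQ, innerG_MQ, hfilter]
    congr 1
    apply List.map_congr_left
    intro k hk
    rcases List.mem_filter.mp hk with ⟨hks, hkx⟩
    have hk1 : k.1 = x := by simpa using hkx
    have : ((r, a) : String × String) ≠ k := by
      intro hh; exact hxr (by rw [← hk1, ← hh])
    rw [sumQ_append]; simp [this]

lemma nest_eq_G (P : List ((String × String) × Int)) : nestD P = G (MQ P) := by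
  induction P using List.reverseRecOn with
  | nil => rfl
  | append_singleton P p ih =>
    rw [nestD, List.foldl_append, List.foldl_cons, List.foldl_nil, ← nestD, ih, nstep_G]

lemma portA_eq (trades : List (List (String × String))) :
    exposure_heatmap_py trades = (nestD (trades.map hmRow)).items.map (fun p => (p.1, p.2.items)) := by
  simp only [exposure_heatmap_py, nestD, List.foldl_map, nstep, hmRow]

-- ---- B-side: ordered-dedup / filter / map commutation lemmas ----

lemma ofList_filter {α : Type} [BEq α] [LawfulBEq α] (l : List α) (p : α → Bool) :
    PySem.Set.ofList (l.filter p) = (PySem.Set.ofList l).filter p := by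
  induction l using List.reverseRecOn with
  | nil => rfl
  | append_singleton l x ih =>
    by_cases hp : p x
    · rw [List.filter_append, show List.filter p [x] = [x] by simp [hp],
          PySem.Set.ofList_append_singleton, PySem.Set.ofList_append_singleton, ih]
      by_cases hm : x ∈ PySem.Set.ofList l
      · rw [PySem.Set.add_of_mem hm, PySem.Set.add_of_mem (List.mem_filter.mpr ⟨hm, hp⟩)]
      · rw [PySem.Set.add_of_not_mem hm,
            PySem.Set.add_of_not_mem (fun hh => hm (List.mem_filter.mp hh).1),
            List.filter_append, show List.filter p [x] = [x] by simp [hp]]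
    · rw [List.filter_append, show List.filter p [x] = [] by simp [hp], List.append_nil, ih,
          PySem.Set.ofList_append_singleton]
      by_cases hm : x ∈ PySem.Set.ofList l
      · rw [PySem.Set.add_of_mem hm]
      · rw [PySem.Set.add_of_not_mem hm, List.filter_append,
            show List.filter p [x] = [] by simp [hp], List.append_nil]

lemma ofList_map_inj {α β : Type} [BEq α] [LawfulBEq α] [BEq β] [LawfulBEq β]
    (l : List α) (f : α → β) (hinj : ∀ x ∈ l, ∀ y ∈ l, f x = f y → x = y) :
    PySem.Set.ofList (l.map f) = (PySem.Set.ofList l).map f := by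
  induction l using List.reverseRecOn with
  | nil => rfl
  | append_singleton l x ih =>
    have hinj' : ∀ a ∈ l, ∀ b ∈ l, f a = f b → a = b := fun a ha b hb =>
      hinj a (List.mem_append_left _ ha) b (List.mem_append_left _ hb)
    rw [List.map_append, List.map_cons, List.map_nil,
        PySem.Set.ofList_append_singleton, PySem.Set.ofList_append_singleton, ih hinj']
    by_cases hm : x ∈ PySem.Set.ofList l
    · rw [PySem.Set.add_of_mem hm, PySem.Set.add_of_mem (List.mem_map_of_mem hm)]
    · rw [PySem.Set.add_of_not_mem hm, PySem.Set.add_of_not_mem ?_, List.map_append,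
          List.map_cons, List.map_nil]
      intro hh
      rcases List.mem_map.mp hh with ⟨y, hy, hfy⟩
      have hyl : y ∈ l := (PySem.Set.mem_ofList l y).mp hy
      have : y = x := hinj y (List.mem_append_left _ hyl) x (by simp) hfy
      exact hm (this ▸ hy)

lemma ofList_map_ofList {α β : Type} [BEq α] [LawfulBEq α] [BEq β] [LawfulBEq β]
    (l : List α) (f : α → β) :
    PySem.Set.ofList ((PySem.Set.ofList l).map f) = PySem.Set.ofList (l.map f) := by
  induction l using List.reverseRecOn with
  | nil => rfl
  | append_singleton l x ih =>
    rw [List.map_append, List.map_cons, List.map_nil,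
        PySem.Set.ofList_append_singleton, PySem.Set.ofList_append_singleton, ← ih]
    by_cases hm : x ∈ PySem.Set.ofList l
    · rw [PySem.Set.add_of_mem hm,
          PySem.Set.add_of_mem ((PySem.Set.mem_ofList _ _).mpr (List.mem_map_of_mem hm))]
    · rw [PySem.Set.add_of_not_mem hm, List.map_append, List.map_cons, List.map_nil,
          PySem.Set.ofList_append_singleton]

-- the group-by shape both ports reduce to, over the shared row list P
def Bform (P : List ((String × String) × Int)) : List (String × List (String × Int)) :=
  (PySem.Set.ofList (P.map (fun p => p.1.1))).map (fun r =>
    (r, (PySem.Set.ofList ((P.filter (fun p => p.1.1 == r)).map (fun p => p.1.2))).map (fun a =>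
      (a, ((P.filter (fun p => p.1.1 == r && p.1.2 == a)).map (fun p => p.2)).sum))))

lemma portB_eq (trades : List (List (String × String))) :
    exposure_heatmap_py_alt trades = Bform (trades.map hmRow) := by
  simp only [exposure_heatmap_py_alt, Bform, hmRow, PySem.List.dedup_eq_ofList,
    List.map_map, List.filter_map]
  rfl

lemma G_items_eq_Bform (P : List ((String × String) × Int)) :
    (G (MQ P)).items.map (fun p => (p.1, p.2.items)) = Bform P := by
  have houter : PySem.Set.ofList ((MQ P).map (·.1.1)) = PySem.Set.ofList (P.map (fun p => p.1.1)) := by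
    have h1 : (MQ P).map (·.1.1) = (PySem.Set.ofList (P.map (·.1))).map (fun k => k.1) := by
      simp [MQ, List.map_map]
    rw [h1, ofList_map_ofList, List.map_map]
    rfl
  simp only [G, PySem.Dict.items, List.map_map, Bform, houter]
  apply List.map_congr_left
  intro r hr
  simp only [Function.comp_apply]
  refine congrArg (fun w => (r, w)) ?_
  -- inner dict items
  have hA : (innerG (MQ P) r).items
      = ((PySem.Set.ofList (P.map (·.1))).filter (fun k => k.1 == r)).map (fun k => (k.2, sumQ P k)) := by
    rw [innerG_MQ]
  rw [hA]
  have hassets : PySem.Set.ofList ((P.filter (fun p => p.1.1 == r)).map (fun p => p.1.2))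
      = ((PySem.Set.ofList (P.map (·.1))).filter (fun k => k.1 == r)).map (fun k => k.2) := by
    have h1 : (P.filter (fun p => p.1.1 == r)).map (fun p => p.1.2)
        = (((P.map (·.1)).filter (fun k => k.1 == r)).map (fun k => k.2)) := by
      rw [List.filter_map, List.map_map]
      rfl
    rw [h1, ofList_map_inj, ofList_filter]
    intro x hx y hy hxy
    rcases List.mem_filter.mp hx with ⟨-, hx1⟩
    rcases List.mem_filter.mp hy with ⟨-, hy1⟩
    have hx1' : x.1 = r := by simpa using hx1
    have hy1' : y.1 = r := by simpa using hy1
    exact Prod.ext (hx1'.trans hy1'.symm) hxy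
  rw [hassets, List.map_map]
  apply List.map_congr_left
  intro k hk
  rcases List.mem_filter.mp hk with ⟨-, hk1⟩
  have hk1' : k.1 = r := by simpa using hk1
  simp only [Function.comp_apply]
  refine congrArg (fun w => (k.2, w)) ?_
  have hpred : ∀ p ∈ P, (p.1.1 == r && p.1.2 == k.2) = (p.1 == k) := by
    intro p _
    rw [Bool.eq_iff_iff, Bool.and_eq_true]
    simp [Prod.ext_iff, hk1']
  rw [List.filter_congr hpred]
  rfl

-- ===== VERDICT (by name: the statement is the Claim_ definition above) =====
theorem exposure_heatmap_py_spec : Claim_equal_exposure_heatmap_py := by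
  intro trades _ _
  unfold Spec_exposure_heatmap_py
  rw [portA_eq, nest_eq_G, G_items_eq_Bform, portB_eq]
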